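-- pv_equiv track=rewrite | github.com/1r0nw1ll/quantum-arithmetic-research | pythagoras_quantum_world_rt/pyth2_validated_programs.py | fibonacci_divisible_indices
-- ===== SOURCE A (Python) =====
-- def fibonacci_prefix(length: int) -> list[int]:
--     if length <= 0:
--         return []
--     seq = [1, 1]
--     while len(seq) < length:
--         seq.append(seq[-1] + seq[-2])
--     return seq[:length]
--
-- def fibonacci_divisible_indices(divisor: int, length: int) -> list[dict[str, int]]:
--     if divisor <= 0:
--         raise ValueError("divisor must be positive")
--     seq = fibonacci_prefix(length)
--     rows: list[dict[str, int]] = []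
--     for idx, value in enumerate(seq, start=1):
--         if value % divisor == 0:
--             rows.append({"index": idx, "value": value})
--     return rows
-- ===== SOURCE B (Python) =====
-- def _fib_pair(n: int) -> tuple[int, int]:
--     """Fast doubling: returns (F(n), F(n+1)) with F(1)=F(2)=1."""
--     if n == 0:
--         return (0, 1)
--     f, g = _fib_pair(n // 2)
--     c = f * (2 * g - f)
--     d = f * f + g * g
--     if n % 2 == 0:
--         return (c, d)
--     return (d, c + d)
--
--
-- def fibonacci_divisible_indices(divisor: int, length: int) -> list[dict[str, int]]:
--     if divisor <= 0:
--         raise ValueError("divisor must be positive")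
--     # Rank of apparition: F(k) % divisor == 0 iff alpha | k, where alpha is the
--     # first index with F(alpha) % divisor == 0.  Scan residues mod divisor to
--     # find alpha (within the needed prefix), then emit only the multiples of
--     # alpha, computing each value directly by fast doubling.
--     alpha = None
--     a, b = 1 % divisor, 1 % divisor
--     idx = 1
--     while idx <= length:
--         if a == 0:
--             alpha = idx
--             break
--         a, b = b, (a + b) % divisor
--         idx += 1
--     if alpha is None:
--         return []
--     rows: list[dict[str, int]] = []
--     m = alpha
--     while m <= length:
--         rows.append({"index": m, "value": _fib_pair(m)[0]})
--         m += alpha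
--     return rows
-- ===== Notes on version B (the rewrite author's own statement) =====
-- stated objective: faster
-- what changed: B uses the rank-of-apparition structure of Fibonacci divisibility: it scans residues mod divisor to find the first divisible index alpha, then emits only the multiples of alpha up to length, computing each value directly by fast doubling, instead of A's generate-full-prefix-then-filter.
import Mathlib
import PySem

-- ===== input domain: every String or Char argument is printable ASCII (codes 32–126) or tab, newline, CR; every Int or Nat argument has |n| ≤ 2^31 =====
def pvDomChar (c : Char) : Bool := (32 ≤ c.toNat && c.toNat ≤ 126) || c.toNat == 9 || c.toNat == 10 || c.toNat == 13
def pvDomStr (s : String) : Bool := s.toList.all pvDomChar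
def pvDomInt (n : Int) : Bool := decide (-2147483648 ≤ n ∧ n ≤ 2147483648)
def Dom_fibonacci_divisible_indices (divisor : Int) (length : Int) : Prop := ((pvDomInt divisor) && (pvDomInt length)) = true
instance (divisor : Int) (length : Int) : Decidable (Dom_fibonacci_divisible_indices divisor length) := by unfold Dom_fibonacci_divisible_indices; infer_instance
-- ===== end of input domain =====

-- B replaces A's generate-prefix-then-filter by the rank-of-apparition algorithm
-- (find the first divisible index by a residue scan mod divisor, emit only its
-- multiples, values by fast doubling); measured faster in a timing run;
-- return values proved equal wherever A returns (divisor > 0).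

-- ===== PORT A =====
-- while len(seq) < length: seq.append(seq[-1] + seq[-2])   (fuel = length.toNat suffices: each step grows seq by 1 from length 2)
def pvFibGrow (target : Nat) (fuel : Nat) (seq : List Int) : List Int :=
  match fuel with
  | 0 => seq
  | f+1 =>
    if seq.length < target then
      pvFibGrow target f
        (seq ++ [(PySem.List.pyGet? seq (-1)).getD 0 + (PySem.List.pyGet? seq (-2)).getD 0])
    else seq

def pvFibonacciPrefix (length : Int) : List Int :=
  if length ≤ 0 then []
  else PySem.List.slice (pvFibGrow length.toNat length.toNat [1, 1]) none (some length)

def fibonacci_divisible_indices (divisor : Int) (length : Int) : List (List (String × Int)) :=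
  if divisor ≤ 0 then []  -- Python raises ValueError here; excluded by Pre_
  else
    (PySem.List.enumerate (pvFibonacciPrefix length) 1).foldl
      (fun rows p =>
        if PySem.Int.mod p.2 divisor == 0 then rows ++ [[("index", p.1), ("value", p.2)]]
        else rows) []

-- ===== PORT B =====
-- _fib_pair: fast doubling, returns (F(n), F(n+1)); B only calls it with n ≥ 1,
-- so the Nat argument (with Nat '/' '%', = Python's on nonnegatives) is exact.
def pvFibPair (n : Nat) : Int × Int :=
  if h : n = 0 then (0, 1)
  else
    let p := pvFibPair (n / 2)
    let c := p.1 * (2 * p.2 - p.1)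
    let d := p.1 * p.1 + p.2 * p.2
    if n % 2 = 0 then (c, d) else (d, c + d)
termination_by n
decreasing_by exact Nat.div_lt_self (Nat.pos_of_ne_zero h) (by norm_num)

-- while idx <= length: if a == 0: alpha = idx; break; a, b = b, (a+b) % divisor; idx += 1
-- (fuel = length.toNat: idx starts at 1 and increases by 1, so the fuel runs out
--  exactly when idx > length, where the loop exits with alpha = None anyway)
def pvFindAlpha (divisor length : Int) : Nat → Int → Int → Int → Option Int
  | 0, _, _, _ => none
  | f+1, idx, a, b =>
    if idx ≤ length then
      if a == 0 then some idx
      else pvFindAlpha divisor length f (idx + 1) b (PySem.Int.mod (a + b) divisor)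
    else none

-- while m <= length: rows.append({...}); m += alpha   (fuel = length.toNat: m starts
--  at alpha ≥ 1 and grows by alpha ≥ 1, so the fuel runs out only with m > length)
def pvRowsLoop (alpha length : Int) : Nat → Int → List (List (String × Int)) → List (List (String × Int))
  | 0, _, rows => rows
  | f+1, m, rows =>
    if m ≤ length then
      pvRowsLoop alpha length f (m + alpha)
        (rows ++ [[("index", m), ("value", (pvFibPair m.toNat).1)]])
    else rows

def fibonacci_divisible_indices_alt (divisor : Int) (length : Int) : List (List (String × Int)) :=
  if divisor ≤ 0 then []  -- Python raises ValueError here; excluded by Pre_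
  else
    match pvFindAlpha divisor length length.toNat 1 (PySem.Int.mod 1 divisor) (PySem.Int.mod 1 divisor) with
    | none => []
    | some alpha => pvRowsLoop alpha length length.toNat alpha []

-- ===== PRECONDITION & SPEC =====
-- Pre_ excludes exactly divisor ≤ 0, where Python A raises ValueError("divisor must be positive").
def Pre_fibonacci_divisible_indices (divisor : Int) (length : Int) : Prop := 0 < divisor
instance (divisor : Int) (length : Int) : Decidable (Pre_fibonacci_divisible_indices divisor length) := by
  unfold Pre_fibonacci_divisible_indices; infer_instance

def pvWitness_fibonacci_divisible_indices : Int × Int := (2, 9)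

def Spec_fibonacci_divisible_indices (divisor : Int) (length : Int) (out : List (List (String × Int))) : Prop := out = fibonacci_divisible_indices_alt divisor length
instance (divisor : Int) (length : Int) (out : List (List (String × Int))) : Decidable (Spec_fibonacci_divisible_indices divisor length out) := by unfold Spec_fibonacci_divisible_indices; infer_instance

-- ===== CLAIM (what is proved, stated in full; the proofs are below) =====
def Claim_equal_fibonacci_divisible_indices : Prop := ∀ (divisor : Int) (length : Int), Dom_fibonacci_divisible_indices divisor length → Pre_fibonacci_divisible_indices divisor length → Spec_fibonacci_divisible_indices divisor length (fibonacci_divisible_indices divisor length)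

-- ===== LEMMAS AND PROOFS =====

-- ---- A-side: the prefix list is [fib 1, …, fib N] ----

-- fib pair after n steps from (a, b)
def pvPair : Nat → Int → Int → Int × Int
  | 0, a, b => (a, b)
  | n+1, a, b => pvPair n b (a + b)

-- list of the first n fib values starting from (a, b)
def pvFL : Nat → Int → Int → List Int
  | 0, _, _ => []
  | n+1, a, b => a :: pvFL n b (a + b)

lemma pvFL_length : ∀ (n : Nat) (a b : Int), (pvFL n a b).length = n := by
  intro n
  induction n with
  | zero => intro a b; rfl
  | succ n ih => intro a b; simp [pvFL, ih]

lemma pvFL_succ : ∀ (n : Nat) (a b : Int), pvFL (n+1) a b = pvFL n a b ++ [(pvPair n a b).1] := by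
  intro n
  induction n with
  | zero => intro a b; rfl
  | succ n ih =>
    intro a b
    show a :: pvFL (n+1) b (a+b) = (a :: pvFL n b (a+b)) ++ [(pvPair (n+1) a b).1]
    rw [ih b (a+b)]
    simp [pvPair]

lemma pvPair_rec : ∀ (n : Nat) (a b : Int), (pvPair (n+2) a b).1 = (pvPair n a b).1 + (pvPair (n+1) a b).1 := by
  intro n
  induction n with
  | zero => intro a b; simp [pvPair]
  | succ n ih => intro a b; simpa [pvPair] using ih b (a + b)

lemma pvFL_take : ∀ (n m : Nat) (a b : Int), n ≤ m → (pvFL m a b).take n = pvFL n a b := by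
  intro n
  induction n with
  | zero => intro m a b _; simp [pvFL]
  | succ n ih =>
    intro m a b h
    cases m with
    | zero => omega
    | succ m => simp [pvFL, ih m b (a + b) (by omega)]

lemma pvGet_last (l : List Int) (x : Int) : PySem.List.pyGet? (l ++ [x]) (-1) = some x := by
  simp [PySem.List.pyGet?, PySem.List.pyIdx?]

lemma pvGet_second_last (l : List Int) (x y : Int) :
    PySem.List.pyGet? (l ++ [x, y]) (-2) = some x := by
  simp [PySem.List.pyGet?, PySem.List.pyIdx?]

lemma pvGrow_eq (target : Nat) : ∀ (fuel k : Nat), 2 ≤ k → target ≤ k + fuel →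
    pvFibGrow target fuel (pvFL k 1 1) = pvFL (max k target) 1 1 := by
  intro fuel
  induction fuel with
  | zero =>
    intro k h2 hle
    have : max k target = k := by omega
    simp [pvFibGrow, this]
  | succ f ih =>
    intro k h2 hle
    by_cases hk : k < target
    · obtain ⟨m, rfl⟩ : ∃ m, k = m + 2 := ⟨k - 2, by omega⟩
      have hsplit : pvFL (m+2) 1 1 = pvFL m 1 1 ++ [(pvPair m 1 1).1, (pvPair (m+1) 1 1).1] := by
        rw [pvFL_succ (m+1), pvFL_succ m]; simp
      have hlen : (pvFL (m+2) (1:Int) 1).length = m + 2 := pvFL_length _ _ _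
      have h1 : PySem.List.pyGet? (pvFL (m+2) (1:Int) 1) (-1) = some ((pvPair (m+1) 1 1).1) := by
        rw [pvFL_succ (m+1)]; exact pvGet_last _ _
      have h2' : PySem.List.pyGet? (pvFL (m+2) (1:Int) 1) (-2) = some ((pvPair m 1 1).1) := by
        rw [hsplit]; exact pvGet_second_last _ _ _
      have hgrow : pvFL (m+2) (1:Int) 1 ++ [(PySem.List.pyGet? (pvFL (m+2) (1:Int) 1) (-1)).getD 0 + (PySem.List.pyGet? (pvFL (m+2) (1:Int) 1) (-2)).getD 0] = pvFL (m+3) 1 1 := by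
        rw [h1, h2', pvFL_succ (m+2), pvPair_rec m 1 1]
        simp [Int.add_comm]
      rw [pvFibGrow]
      rw [if_pos (by rw [hlen]; omega)]
      rw [hgrow]
      have := ih (m+3) (by omega) (by omega)
      rw [this]
      congr 1
      omega
    · have : max k target = k := by omega
      rw [pvFibGrow, if_neg (by rw [pvFL_length]; omega), this]

lemma pvPrefix_eq (length : Int) (h : 0 < length) :
    pvFibonacciPrefix length = pvFL length.toNat 1 1 := by
  have hn : (1:Nat) ≤ length.toNat := by omega
  unfold pvFibonacciPrefix
  rw [if_neg (by omega)]
  have h2 : ([1, 1] : List Int) = pvFL 2 1 1 := by rfl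
  rw [h2, pvGrow_eq length.toNat length.toNat 2 (by omega) (by omega)]
  rw [PySem.List.slice_to _ (by omega : (0:Int) ≤ length)]
  exact pvFL_take length.toNat (max 2 length.toNat) 1 1 (by omega)

lemma pvFibCast (x y : Nat) (h : x = y) : (Nat.fib x : Int) = (Nat.fib y : Int) := by rw [h]

-- pvFL from a fib pair lists consecutive Fibonacci numbers
lemma pvFL_fib : ∀ (n s : Nat),
    pvFL n (Nat.fib (s+1)) (Nat.fib (s+2)) = (List.range n).map (fun i => (Nat.fib (s+1+i) : Int)) := by
  intro n
  induction n with
  | zero => intro s; rfl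
  | succ n ih =>
    intro s
    have hfib : (Nat.fib (s+1) : Int) + (Nat.fib (s+2) : Int) = (Nat.fib (s+3) : Int) := by
      have h3 : Nat.fib (s+3) = Nat.fib (s+1) + Nat.fib (s+2) := Nat.fib_add_two
      rw [h3]; push_cast; ring
    have hmap : (List.range (n+1)).map (fun i => (Nat.fib (s+1+i) : Int))
        = (Nat.fib (s+1) : Int) :: (List.range n).map (fun i => (Nat.fib (s+1+1+i) : Int)) := by
      rw [List.range_succ_eq_map, List.map_cons, List.map_map]
      congr 1
      apply List.map_congr_left
      intro i _
      simp only [Function.comp_apply]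
      exact pvFibCast _ _ (by omega)
    rw [hmap]
    show (Nat.fib (s+1) : Int) :: pvFL n (Nat.fib (s+2)) ((Nat.fib (s+1):Int) + (Nat.fib (s+2):Int)) = _
    rw [hfib]
    congr 1
    exact ih (s+1)

lemma pvFL_fib11 (n : Nat) : pvFL n 1 1 = (List.range n).map (fun i => (Nat.fib (i+1) : Int)) := by
  have h := pvFL_fib n 0
  norm_num [Nat.fib_one, Nat.fib_two] at h
  rw [h]
  apply List.map_congr_left
  intro i _
  exact pvFibCast _ _ (by omega)

-- canonical A-side list: indices k ∈ pyRange 1 (N+1) with divisor ∣ fib k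
def pvEntry (k : Int) : List (String × Int) := [("index", k), ("value", (Nat.fib k.toNat : Int))]

def pvCanon (divisor : Int) (N : Nat) : List (List (String × Int)) :=
  ((PySem.List.pyRange 1 ((N:Int)+1) 1).filter
      (fun k => decide (divisor ∣ (Nat.fib k.toNat : Int)))).map pvEntry

lemma pvA_canon (divisor : Int) (hD : 0 < divisor) : ∀ (N : Nat),
    ((PySem.List.enumerate (pvFL N 1 1) 1).filter (fun q => PySem.Int.mod q.2 divisor == 0)).map
      (fun q => [("index", q.1), ("value", q.2)]) = pvCanon divisor N := by
  intro N
  induction N with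
  | zero => simp [pvFL, PySem.List.enumerate, pvCanon, PySem.List.pyRange_one_eq_nil]
  | succ N ih =>
    rw [pvFL_succ, PySem.List.enumerate_append, List.filter_append, List.map_append, ih]
    have hpair : (pvPair N 1 1).1 = (Nat.fib (N+1) : Int) := by
      have h1 := pvFL_succ N 1 1
      have h2 := pvFL_fib11 (N+1)
      rw [h1, List.range_succ, List.map_append] at h2
      have h3 := pvFL_fib11 N
      rw [h3] at h2
      simpa using List.append_inj_right h2 (by simp)
    have hrange : PySem.List.pyRange 1 ((N+1:Nat)+1) 1 = PySem.List.pyRange 1 ((N:Int)+1) 1 ++ [((N:Int)+1)] := by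
      have h := PySem.List.pyRange_one_succ_right (show (1:Int) ≤ (N:Int)+1 by omega)
      have hcast : ((N+1:Nat):Int)+1 = ((N:Int)+1)+1 := by push_cast; ring
      rw [hcast, h]
    unfold pvCanon
    rw [hrange, List.filter_append, List.map_append]
    congr 1
    have hlen : (pvFL N (1:Int) 1).length = N := pvFL_length N 1 1
    have hNt : (((N:Int)+1)).toNat = N+1 := by omega
    rw [hpair, hlen]
    have e1 : PySem.List.enumerate [(Nat.fib (N+1) : Int)] (1+(N:Int)) = [((1+(N:Int)), (Nat.fib (N+1) : Int))] := by
      simp [PySem.List.enumerate]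
    rw [e1]
    have hdvd : (PySem.Int.mod (Nat.fib (N+1) : Int) divisor == 0) = decide (divisor ∣ (Nat.fib (N+1) : Int)) := by
      by_cases h : divisor ∣ (Nat.fib (N+1) : Int)
      · simp [h, (PySem.Int.mod_eq_zero_iff_dvd _ _).mpr h]
      · have hne : ¬ PySem.Int.mod (Nat.fib (N+1) : Int) divisor = 0 :=
          fun hc => h ((PySem.Int.mod_eq_zero_iff_dvd _ _).mp hc)
        simp [h, hne]
    simp only [List.filter_cons, List.filter_nil, hdvd, hNt]
    by_cases h : divisor ∣ (Nat.fib (N+1) : Int)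
    · simp only [h, decide_true, if_true, List.map_cons, List.map_nil]
      unfold pvEntry
      have hidx : (1+(N:Int)) = (N:Int)+1 := by ring
      rw [hidx, hNt]
    · simp [h]

-- A's function equals the canonical list (for positive divisor)
lemma pvA_eq (divisor length : Int) (hD : 0 < divisor) :
    fibonacci_divisible_indices divisor length = pvCanon divisor length.toNat := by
  unfold fibonacci_divisible_indices
  rw [if_neg (by omega)]
  have hfold : ∀ (xs : List Int),
      (PySem.List.enumerate xs 1).foldl
        (fun rows p =>
          if PySem.Int.mod p.2 divisor == 0 then rows ++ [[("index", p.1), ("value", p.2)]]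
          else rows) []
      = ((PySem.List.enumerate xs 1).filter (fun q => PySem.Int.mod q.2 divisor == 0)).map
          (fun q => [("index", q.1), ("value", q.2)]) := by
    intro xs
    simpa using PySem.List.foldl_append_if
      (fun q => PySem.Int.mod q.2 divisor == 0)
      (fun q => [("index", q.1), ("value", q.2)]) (PySem.List.enumerate xs 1) []
  rw [hfold]
  by_cases hl : 0 < length
  · rw [pvPrefix_eq length hl, pvA_canon divisor hD]
  · have h0 : length.toNat = 0 := by omega
    have : pvFibonacciPrefix length = [] := by unfold pvFibonacciPrefix; rw [if_pos (by omega)]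
    rw [this, h0]
    simp [PySem.List.enumerate, pvCanon, PySem.List.pyRange_one_eq_nil]

-- ---- number theory: zeros of fib mod d are the multiples of the first zero ----

lemma pvZeroIff (e a : Nat) (ha : 0 < a) (he : e ∣ Nat.fib a)
    (hmin : ∀ j, 0 < j → j < a → ¬ e ∣ Nat.fib j) :
    ∀ k, 0 < k → (e ∣ Nat.fib k ↔ a ∣ k) := by
  intro k hk
  constructor
  · intro hdk
    have hg : e ∣ Nat.fib (Nat.gcd k a) := by
      rw [Nat.fib_gcd]
      exact Nat.dvd_gcd hdk he
    have hgpos : 0 < Nat.gcd k a := Nat.gcd_pos_of_pos_right k ha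
    have hgle : Nat.gcd k a ≤ a := Nat.le_of_dvd ha (Nat.gcd_dvd_right k a)
    have : Nat.gcd k a = a := by
      by_contra hne
      exact hmin _ hgpos (lt_of_le_of_ne hgle hne) hg
    rw [← this]
    exact Nat.gcd_dvd_left k a
  · intro hak
    exact dvd_trans he (Nat.fib_dvd a k hak)

-- ---- B-side: fast doubling is fib ----

lemma pvFibPair_eq : ∀ n : Nat, pvFibPair n = ((Nat.fib n : Int), (Nat.fib (n+1) : Int)) := by
  intro n
  induction n using Nat.strong_induction_on with
  | _ n ih =>
    by_cases h : n = 0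
    · subst h; simp [pvFibPair]
    · rw [pvFibPair, dif_neg h]
      have hlt : n / 2 < n := Nat.div_lt_self (Nat.pos_of_ne_zero h) (by norm_num)
      rw [ih (n / 2) hlt]
      set m := n / 2 with hm
      have h1 : Nat.fib m ≤ Nat.fib (m+1) := Nat.fib_mono (Nat.le_succ m)
      have hle : Nat.fib m ≤ 2 * Nat.fib (m+1) := by omega
      have hc : (Nat.fib m : Int) * (2 * (Nat.fib (m+1) : Int) - (Nat.fib m : Int)) = (Nat.fib (2*m) : Int) := by
        rw [Nat.fib_two_mul]
        push_cast [Nat.cast_sub hle]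
        ring
      have hd : (Nat.fib m : Int) * (Nat.fib m : Int) + (Nat.fib (m+1) : Int) * (Nat.fib (m+1) : Int) = (Nat.fib (2*m+1) : Int) := by
        rw [Nat.fib_two_mul_add_one]
        push_cast
        ring
      by_cases hpar : n % 2 = 0
      · have h2m : 2 * m = n := by omega
        have hg1 : (Nat.fib m : Int) * (2 * (Nat.fib (m+1) : Int) - (Nat.fib m : Int)) = (Nat.fib n : Int) := by
          rw [hc, h2m]
        have hg2 : (Nat.fib m : Int) * (Nat.fib m : Int) + (Nat.fib (m+1) : Int) * (Nat.fib (m+1) : Int) = (Nat.fib (n+1) : Int) := by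
          rw [hd]; exact pvFibCast _ _ (by omega)
        simp [hpar, hg1, hg2]
      · have h2m : n = 2 * m + 1 := by omega
        have hg1 : (Nat.fib m : Int) * (Nat.fib m : Int) + (Nat.fib (m+1) : Int) * (Nat.fib (m+1) : Int) = (Nat.fib n : Int) := by
          rw [hd]; exact pvFibCast _ _ (by omega)
        have hsum : (Nat.fib (2*m) : Int) + (Nat.fib n : Int) = (Nat.fib (n+1) : Int) := by
          have hstep : Nat.fib (2*m+2) = Nat.fib (2*m) + Nat.fib (2*m+1) := Nat.fib_add_two
          rw [show n = 2*m+1 from h2m, show 2*m+1+1 = 2*m+2 from rfl, hstep]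
          push_cast; ring
        simp [hpar, hg1, hc, hsum]

-- ---- B-side: the residue scan finds the least divisible index ----

lemma pvMod_step (divisor x y : Int) (hD : 0 < divisor) :
    PySem.Int.mod (PySem.Int.mod x divisor + PySem.Int.mod y divisor) divisor = PySem.Int.mod (x + y) divisor := by
  simp only [PySem.Int.mod_eq_emod_of_pos hD]
  exact (Int.add_emod x y divisor).symm

lemma pvFindAlpha_spec (divisor length : Int) (hD : 0 < divisor) :
    ∀ (f j : Nat), length ≤ (j : Int) + (f : Int) →
    (∀ k : Nat, 0 < k → k ≤ j → ¬ divisor ∣ (Nat.fib k : Int)) →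
    (pvFindAlpha divisor length f ((j:Int)+1)
        (PySem.Int.mod (Nat.fib (j+1) : Int) divisor)
        (PySem.Int.mod (Nat.fib (j+2) : Int) divisor) = none →
       ∀ k : Nat, 0 < k → (k:Int) ≤ length → ¬ divisor ∣ (Nat.fib k : Int)) ∧
    (∀ α : Int, pvFindAlpha divisor length f ((j:Int)+1)
        (PySem.Int.mod (Nat.fib (j+1) : Int) divisor)
        (PySem.Int.mod (Nat.fib (j+2) : Int) divisor) = some α →
       0 < α ∧ α ≤ length ∧ divisor ∣ (Nat.fib α.toNat : Int) ∧
       ∀ k : Nat, 0 < k → (k:Int) < α → ¬ divisor ∣ (Nat.fib k : Int)) := by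
  intro f
  induction f with
  | zero =>
    intro j hfuel hprev
    constructor
    · intro _ k hk hkl
      apply hprev k hk
      push_cast at hfuel
      omega
    · intro α hsome
      simp [pvFindAlpha] at hsome
  | succ f ih =>
    intro j hfuel hprev
    by_cases hin : (j:Int)+1 ≤ length
    · by_cases hz : PySem.Int.mod (Nat.fib (j+1) : Int) divisor = 0
      · -- found alpha = j+1
        have heq : pvFindAlpha divisor length (f+1) ((j:Int)+1)
            (PySem.Int.mod (Nat.fib (j+1) : Int) divisor)
            (PySem.Int.mod (Nat.fib (j+2) : Int) divisor) = some ((j:Int)+1) := by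
          rw [pvFindAlpha, if_pos hin]
          simp [hz]
        constructor
        · intro hnone; rw [heq] at hnone; cases hnone
        · intro α hsome
          rw [heq] at hsome
          injection hsome with hα
          subst hα
          refine ⟨by omega, hin, ?_, ?_⟩
          · have : ((j:Int)+1).toNat = j+1 := by omega
            rw [this]
            exact (PySem.Int.mod_eq_zero_iff_dvd _ _).mp hz
          · intro k hk hkj
            exact hprev k hk (by omega)
      · -- step: recurse with j+1
        have hstep : pvFindAlpha divisor length (f+1) ((j:Int)+1)
            (PySem.Int.mod (Nat.fib (j+1) : Int) divisor)
            (PySem.Int.mod (Nat.fib (j+2) : Int) divisor)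
          = pvFindAlpha divisor length f ((j:Int)+1+1)
            (PySem.Int.mod (Nat.fib (j+2) : Int) divisor)
            (PySem.Int.mod (Nat.fib (j+3) : Int) divisor) := by
          rw [pvFindAlpha, if_pos hin]
          have hb : (PySem.Int.mod (Nat.fib (j+1) : Int) divisor == 0) = false := by
            simp [hz]
          rw [hb]
          simp only [Bool.false_eq_true, if_false]
          congr 1
          rw [pvMod_step divisor _ _ hD]
          congr 1
          have : Nat.fib (j+3) = Nat.fib (j+1) + Nat.fib (j+2) := Nat.fib_add_two
          push_cast [this]; ring
        have hprev' : ∀ k : Nat, 0 < k → k ≤ j+1 → ¬ divisor ∣ (Nat.fib k : Int) := by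
          intro k hk hkj
          rcases Nat.lt_or_ge k (j+1) with h | h
          · exact hprev k hk (by omega)
          · have : k = j+1 := by omega
            subst this
            intro hdvd
            exact hz ((PySem.Int.mod_eq_zero_iff_dvd _ _).mpr hdvd)
        have := ih (j+1) (by push_cast; push_cast at hfuel; omega) hprev'
        rw [hstep]
        have hcast : ((j:Int)+1+1) = ((j+1 : Nat) : Int)+1 := by push_cast; ring
        rw [hcast]
        exact this
    · -- loop exits: none
      have heq : pvFindAlpha divisor length (f+1) ((j:Int)+1)
          (PySem.Int.mod (Nat.fib (j+1) : Int) divisor)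
          (PySem.Int.mod (Nat.fib (j+2) : Int) divisor) = none := by
        rw [pvFindAlpha, if_neg hin]
      constructor
      · intro _ k hk hkl
        exact hprev k hk (by omega)
      · intro α hsome; rw [heq] at hsome; cases hsome

-- ---- B-side: the multiples loop equals the filtered range ----

-- no multiple of a strictly between consecutive multiples
lemma pvNoMultBetween (a m j : Int) (ha : 0 < a) (hm : a ∣ m) (h1 : m < j) (h2 : j < m + a) :
    ¬ a ∣ j := by
  rintro ⟨c, rfl⟩
  rcases hm with ⟨q, rfl⟩
  have hq : q < c := by
    by_contra h
    push_neg at h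
    have := mul_le_mul_of_nonneg_left h (le_of_lt ha)
    omega
  have : c < q + 1 := by
    by_contra h
    push_neg at h
    have := mul_le_mul_of_nonneg_left h (le_of_lt ha)
    rw [mul_add, mul_one] at this
    omega
  omega

def pvG (a length m : Int) : List Int :=
  (PySem.List.pyRange m (length+1) 1).filter (fun k => decide (a ∣ k))

lemma pvG_skip (a length : Int) (ha : 0 < a) (m : Int) (hm : a ∣ m) :
    ∀ (t : Nat) (j : Int), j = m + a - (t:Int) → m < j → j ≤ m + a →
    (PySem.List.pyRange j (length+1) 1).filter (fun k => decide (a ∣ k)) = pvG a length (m+a) := by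
  intro t
  induction t with
  | zero =>
    intro j hj _ _
    have : j = m + a := by omega
    subst this; rfl
  | succ t ih =>
    intro j hj hmj hja
    by_cases hend : j = m + a
    · subst hend; rfl
    · have hjlt : j < m + a := lt_of_le_of_ne hja hend
      by_cases hjl : j ≤ length
      · rw [PySem.List.pyRange_one_cons (by omega)]
        rw [List.filter_cons]
        have : ¬ a ∣ j := pvNoMultBetween a m j ha hm hmj hjlt
        simp only [this, decide_false]
        simp only [Bool.false_eq_true, if_false]
        exact ih (j+1) (by omega) (by omega) (by omega)
      · -- j > length: both ranges empty
        rw [PySem.List.pyRange_one_eq_nil (by omega)]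
        unfold pvG
        rw [PySem.List.pyRange_one_eq_nil (by omega)]

lemma pvG_cons (a length m : Int) (ha : 0 < a) (hm : a ∣ m) (hml : m ≤ length) :
    pvG a length m = m :: pvG a length (m+a) := by
  unfold pvG
  rw [PySem.List.pyRange_one_cons (by omega)]
  rw [List.filter_cons]
  simp only [hm, decide_true, if_true]
  congr 1
  exact pvG_skip a length ha m hm (a-1).toNat (m+1) (by omega) (by omega) (by omega)

lemma pvG_nil (a length m : Int) (h : length < m) : pvG a length m = [] := by
  unfold pvG
  rw [PySem.List.pyRange_one_eq_nil (by omega)]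
  rfl

lemma pvRowsLoop_eq (a length : Int) (ha : 0 < a) :
    ∀ (f : Nat) (m : Int) (rows : List (List (String × Int))), a ∣ m → 0 < m → length < m + (f:Int) →
    pvRowsLoop a length f m rows = rows ++ (pvG a length m).map (fun k => [("index", k), ("value", (pvFibPair k.toNat).1)]) := by
  intro f
  induction f with
  | zero =>
    intro m rows hm hmp hfuel
    rw [pvG_nil a length m (by simpa using hfuel)]
    simp [pvRowsLoop]
  | succ f ih =>
    intro m rows hm hmp hfuel
    rw [pvRowsLoop]
    by_cases hml : m ≤ length
    · rw [if_pos hml]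
      rw [ih (m+a) _ (by exact Dvd.dvd.add hm (dvd_refl a)) (by omega) (by push_cast; push_cast at hfuel; omega)]
      rw [pvG_cons a length m ha hm hml]
      simp
    · rw [if_neg hml]
      rw [pvG_nil a length m (by omega)]
      simp

-- the canonical list, filtered by "multiple of a", as pvG from a
lemma pvCanon_eq_G (divisor length : Int) (a : Int) (ha : 0 < a) (hal : a ≤ length)
    (hiff : ∀ k : Int, 1 ≤ k → k ≤ length → (divisor ∣ (Nat.fib k.toNat : Int) ↔ a ∣ k)) :
    pvCanon divisor length.toNat = (pvG a length a).map pvEntry := by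
  unfold pvCanon
  have hN : ((length.toNat : Int)+1) = length + 1 := by omega
  rw [hN]
  congr 1
  have h1 : PySem.List.pyRange 1 (length+1) 1 = PySem.List.pyRange 1 a 1 ++ PySem.List.pyRange a (length+1) 1 :=
    PySem.List.pyRange_one_append 1 a (length+1) (by omega) (by omega)
  rw [h1, List.filter_append]
  have h2 : (PySem.List.pyRange 1 a 1).filter (fun k => decide (divisor ∣ (Nat.fib k.toNat : Int))) = [] := by
    rw [List.filter_eq_nil_iff]
    intro k hk
    rw [PySem.List.mem_pyRange_one] at hk
    simp only [decide_eq_true_eq]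
    intro hdvd
    have hak : a ∣ k := (hiff k hk.1 (by omega)).mp hdvd
    have : a ≤ k := Int.le_of_dvd (by omega) hak
    omega
  rw [h2, List.nil_append]
  unfold pvG
  apply List.filter_congr
  intro k hk
  rw [PySem.List.mem_pyRange_one] at hk
  have := hiff k (by omega) (by omega)
  simp [this]

-- B's function in terms of pvG / the canonical list
lemma pvB_eq (divisor length : Int) (hD : 0 < divisor) :
    fibonacci_divisible_indices_alt divisor length = pvCanon divisor length.toNat := by
  unfold fibonacci_divisible_indices_alt
  rw [if_neg (by omega)]
  have hmod1 : PySem.Int.mod 1 divisor = PySem.Int.mod (Nat.fib 1 : Int) divisor := by norm_num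
  have hmod2 : PySem.Int.mod 1 divisor = PySem.Int.mod (Nat.fib 2 : Int) divisor := by
    norm_num [Nat.fib_two]
  have hstart := pvFindAlpha_spec divisor length hD length.toNat 0 (by omega)
    (by intro k hk hk0; omega)
  rcases hcase : pvFindAlpha divisor length length.toNat 1 (PySem.Int.mod 1 divisor) (PySem.Int.mod 1 divisor) with _ | α
  · -- no divisible index within the prefix: both sides empty
    show [] = pvCanon divisor length.toNat
    have hnone : ∀ k : Nat, 0 < k → (k:Int) ≤ length → ¬ divisor ∣ (Nat.fib k : Int) := by
      apply hstart.1
      rw [show ((0:Nat):Int)+1 = (1:Int) by norm_num] at *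
      rw [← hmod1, ← hmod2]
      exact hcase
    have : pvCanon divisor length.toNat = [] := by
      unfold pvCanon
      rw [List.map_eq_nil_iff, List.filter_eq_nil_iff]
      intro k hk
      rw [PySem.List.mem_pyRange_one] at hk
      simp only [decide_eq_true_eq]
      have hkN : (k:Int) ≤ length := by omega
      have : (k.toNat : Int) = k := by omega
      intro hdvd
      exact hnone k.toNat (by omega) (by omega) hdvd
    rw [this]
  · -- alpha found
    have hsome := hstart.2 α (by
      rw [show ((0:Nat):Int)+1 = (1:Int) by norm_num] at *
      rw [← hmod1, ← hmod2]
      exact hcase)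
    obtain ⟨hαpos, hαle, hαdvd, hαmin⟩ := hsome
    have hiff : ∀ k : Int, 1 ≤ k → k ≤ length → (divisor ∣ (Nat.fib k.toNat : Int) ↔ α ∣ k) := by
      intro k hk1 hkl
      have hDnat : divisor.toNat ∣ Nat.fib α.toNat := by
        rcases hαdvd with ⟨c, hc⟩
        have hfp : (0:Int) < (Nat.fib α.toNat : Int) := by
          exact_mod_cast Nat.fib_pos.mpr (show 0 < α.toNat by omega)
        have hc0 : 0 ≤ c := by nlinarith
        refine ⟨c.toNat, ?_⟩
        have : (Nat.fib α.toNat : Int) = (divisor.toNat : Int) * (c.toNat : Int) := by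
          rw [hc]; congr 1 <;> omega
        exact_mod_cast this
      have hminN : ∀ j, 0 < j → j < α.toNat → ¬ divisor.toNat ∣ Nat.fib j := by
        intro j hj hjα hdvd
        apply hαmin j hj (by omega)
        rcases hdvd with ⟨c, hc⟩
        exact ⟨(c:Int), by push_cast [hc]; congr 1; omega⟩
      have hz := pvZeroIff divisor.toNat α.toNat (by omega) hDnat hminN k.toNat (by omega)
      constructor
      · intro hdvd
        have : divisor.toNat ∣ Nat.fib k.toNat := by
          rcases hdvd with ⟨c, hc⟩
          have hfp : (0:Int) < (Nat.fib k.toNat : Int) := by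
            exact_mod_cast Nat.fib_pos.mpr (show 0 < k.toNat by omega)
          have hc0 : 0 ≤ c := by nlinarith
          refine ⟨c.toNat, ?_⟩
          have : (Nat.fib k.toNat : Int) = (divisor.toNat : Int) * (c.toNat : Int) := by
            rw [hc]; congr 1 <;> omega
          exact_mod_cast this
        have hak : α.toNat ∣ k.toNat := hz.mp this
        rcases hak with ⟨c, hc⟩
        exact ⟨(c:Int), by rw [show k = ((k.toNat:Nat):Int) by omega]; push_cast [hc]; congr 1; omega⟩
      · intro hak
        have : α.toNat ∣ k.toNat := by
          rcases hak with ⟨c, hc⟩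
          have hc0 : 0 ≤ c := by nlinarith
          refine ⟨c.toNat, ?_⟩
          have : (k:Int) = (α.toNat : Int) * (c.toNat : Int) := by
            rw [hc]; congr 1 <;> omega
          omega
        have := hz.mpr this
        rcases this with ⟨c, hc⟩
        exact ⟨(c:Int), by push_cast [hc]; congr 1; omega⟩
    show pvRowsLoop α length length.toNat α [] = pvCanon divisor length.toNat
    rw [pvRowsLoop_eq α length hαpos length.toNat α [] (dvd_refl α) hαpos (by omega)]
    rw [List.nil_append]
    rw [pvCanon_eq_G divisor length α hαpos hαle hiff]
    apply List.map_congr_left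
    intro k hk
    have hkmem : α ≤ k ∧ k < length + 1 := by
      have : k ∈ PySem.List.pyRange α (length+1) 1 := List.mem_of_mem_filter hk
      rwa [PySem.List.mem_pyRange_one] at this
    unfold pvEntry
    rw [pvFibPair_eq k.toNat]

-- ===== VERDICT (by name: the statement is the Claim_ definition above) =====
theorem fibonacci_divisible_indices_spec : Claim_equal_fibonacci_divisible_indices := by
  intro divisor length _ hpre
  unfold Spec_fibonacci_divisible_indices
  rw [pvA_eq divisor length hpre, pvB_eq divisor length hpre]
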